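-- pv_equiv track=rewrite | github.com/owenmoogk/gists | ccc/good_samples.py | add1
-- ===== SOURCE A (Python) =====
-- def add1(string):
--   myList = list(string)
--   i = -1
--   if '1' not in string:
--     return(False)
--   if myList[i] == '1':
--     myList[i] = '2'
--     return("".join(myList))
--   if myList[i] == '2':
--     while myList[i] != '1':
--       myList[i] = '1'
--       i -= 1
--     myList[i] = '2'
--     return(''.join(myList))
-- ===== SOURCE B (Python) =====
-- def add1(string):
--   if '1' not in string:
--     return False
--   if string[-1] not in ('1', '2'):
--     return None
--   idx = string.rfind('1')
--   return string[:idx] + '2' + '1' * (len(string) - idx - 1)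
-- ===== Notes on version B (the rewrite author's own statement) =====
-- stated objective: simpler
-- what changed: Replaces A's in-place carry loop (mutating list cells backwards until the rightmost '1') with a single closed-form construction: find the rightmost '1' with rfind and build prefix + '2' + a run of '1's, covering A's '1'- and '2'-ending branches in one expression.
-- outside the precondition, e.g. on add1('abc'): A returns False, B returns False
import Mathlib
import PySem

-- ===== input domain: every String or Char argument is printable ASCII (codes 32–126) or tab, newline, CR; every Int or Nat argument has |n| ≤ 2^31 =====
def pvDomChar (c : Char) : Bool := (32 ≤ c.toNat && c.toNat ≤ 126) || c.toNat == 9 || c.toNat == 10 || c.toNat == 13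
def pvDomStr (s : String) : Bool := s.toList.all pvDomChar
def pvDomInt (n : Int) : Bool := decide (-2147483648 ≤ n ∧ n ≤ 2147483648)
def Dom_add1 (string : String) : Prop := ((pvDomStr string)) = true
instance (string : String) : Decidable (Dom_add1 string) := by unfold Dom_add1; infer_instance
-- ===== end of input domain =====

-- B replaces A's in-place backwards carry loop by a closed-form rfind construction (simpler, same cost).


-- ===== PORT A =====
-- the 'while myList[i] != "1"' loop; fuel = len+1 bounds its iterations
-- (pyGet? = none is exactly where Python's myList[i] would raise IndexError, unreachable under Pre_)
def add1Loop : Nat → List Char → Int → Option (List Char)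
  | 0, _, _ => none
  | fuel+1, l, i =>
    match PySem.List.pyGet? l i with
    | none => none
    | some c =>
      if c ≠ '1' then add1Loop fuel (PySem.List.pySetD l i '1') (i - 1)
      else some (PySem.List.pySetD l i '2')

def add1 (string : String) : Option String :=
  let myList := string.toList
  -- Python returns False (a bool, not a str/None) when '1' is absent: excluded by Pre_add1
  if PySem.Str.isIn "1" string = false then none
  else if PySem.List.pyGet? myList (-1) = some '1' then
    some (String.ofList (PySem.List.pySetD myList (-1) '2'))
  else if PySem.List.pyGet? myList (-1) = some '2' then
    (add1Loop (myList.length + 1) myList (-1)).map (fun l => String.ofList l)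
  else none

-- ===== PORT B =====
def add1_alt (string : String) : Option String :=
  let cl := string.toList
  -- Python B returns False here too: excluded by Pre_add1
  if PySem.Str.isIn "1" string = false then none
  else
    match PySem.List.pyGet? cl (-1) with
    | none => none
    | some c =>
      if ¬ (c = '1' ∨ c = '2') then none
      else
        let idx := PySem.Str.rfind string "1"
        some (String.ofList (PySem.List.slice cl none (some idx) ++
          '2' :: List.replicate ((cl.length : Int) - idx - 1).toNat '1'))

-- ===== PRECONDITION & SPEC =====
-- Pre_ excludes exactly the strings not containing '1': there Python A (and B) return the
-- bool False, which is not a value of the declared Optional[str] return type.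
def Pre_add1 (string : String) : Prop := PySem.Str.isIn "1" string = true
instance (string : String) : Decidable (Pre_add1 string) := by unfold Pre_add1; infer_instance
def pvWitness_add1 : String := "a21"
def Spec_add1 (string : String) (out : Option String) : Prop := out = add1_alt string
instance (string : String) (out : Option String) : Decidable (Spec_add1 string out) := by unfold Spec_add1; infer_instance

-- ===== CLAIM (what is proved, stated in full; the proofs are below) =====
def Claim_equal_add1 : Prop := ∀ (string : String), Dom_add1 string → Pre_add1 string → Spec_add1 string (add1 string)

-- ===== LEMMAS AND PROOFS =====

-- negative-index primitives at index m - n (the loop's i), written over the true index m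
lemma pyGet_negIdx (l : List Char) (m : Nat) (h : m < l.length) :
    PySem.List.pyGet? l ((m : Int) - (l.length : Int)) = l[m]? := by
  simp only [PySem.List.pyGet?, PySem.List.pyIdx?]
  rw [if_neg (by omega), if_pos (by omega)]
  simp only [Option.bind_some]
  congr 1
  omega

lemma pySetD_negIdx (l : List Char) (m : Nat) (v : Char) (h : m < l.length) :
    PySem.List.pySetD l ((m : Int) - (l.length : Int)) v = l.set m v := by
  simp only [PySem.List.pySetD, PySem.List.pySet?, PySem.List.pyIdx?]
  rw [if_neg (by omega), if_pos (by omega)]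
  simp only [Option.map_some, Option.getD_some]
  congr 1
  omega

lemma take_set_of_le (l : List Char) (i n : Nat) (a : Char) (h : n ≤ i) :
    (l.set i a).take n = l.take n := by
  rw [List.take_set, List.set_eq_of_length_le]
  simpa using by omega

-- the carry loop, characterised by j = the rightmost '1' at or left of position m
lemma add1Loop_eq (m : Nat) : ∀ (l : List Char) (fuel j : Nat),
    m < l.length → m + 2 ≤ fuel → j ≤ m → l[j]? = some '1' →
    (∀ k, j < k → k ≤ m → l[k]? ≠ some '1') →
    add1Loop fuel l ((m : Int) - (l.length : Int)) =
      some (l.take j ++ '2' :: (List.replicate (m - j) '1' ++ l.drop (m+1))) := by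
  induction m with
  | zero =>
    intro l fuel j hm hfuel hj hP _
    interval_cases j
    obtain ⟨f, rfl⟩ : ∃ f, fuel = f + 1 := ⟨fuel - 1, by omega⟩
    simp only [add1Loop, pyGet_negIdx l 0 hm, hP]
    simp only [pySetD_negIdx l 0 '2' hm]
    rw [List.set_eq_take_append_cons_drop, if_pos hm]
    simp
  | succ m ih =>
    intro l fuel j hm hfuel hj hP hgr
    obtain ⟨f, rfl⟩ : ∃ f, fuel = f + 1 := ⟨fuel - 1, by omega⟩
    have hsome : l[m+1]? = some l[m+1] := List.getElem?_eq_getElem hm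
    simp only [add1Loop, pyGet_negIdx l (m+1) hm, hsome]
    by_cases hc : l[m+1] = '1'
    · -- then j = m+1 by maximality
      have hjm : j = m + 1 := by
        by_contra hne
        have hjlt : j < m + 1 := by omega
        exact hgr (m+1) (by omega) (le_refl _) (by rw [hsome, hc])
      subst hjm
      rw [if_neg (by simp [hc])]
      rw [pySetD_negIdx l (m+1) '2' hm]
      rw [List.set_eq_take_append_cons_drop, if_pos hm]
      simp
    · have hjle : j ≤ m := by
        rcases Nat.lt_or_ge j (m+1) with h | h
        · omega
        · exfalso
          have hje : j = m+1 := by omega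
          rw [hje, hsome] at hP
          exact hc (Option.some.inj hP)
      rw [if_pos (by simpa using hc)]
      rw [pySetD_negIdx l (m+1) '1' hm]
      have hlen : (l.set (m+1) '1').length = l.length := by simp
      have harg : ((m+1 : Nat) : Int) - (l.length : Int) - 1
          = (m : Int) - ((l.set (m+1) '1').length : Int) := by rw [hlen]; push_cast; omega
      rw [harg]
      rw [ih (l.set (m+1) '1') f j (by omega) (by omega) hjle
        (by rw [List.getElem?_set_ne (by omega)]; exact hP)
        (by intro k hk1 hk2
            rw [List.getElem?_set_ne (by omega)]
            exact hgr k hk1 (by omega))]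
      congr 1
      rw [take_set_of_le l (m+1) j '1' (by omega)]
      congr 1
      have hdrop : (l.set (m+1) '1').drop (m+1) = '1' :: l.drop (m+2) := by
        rw [List.drop_eq_getElem_cons (by simp; omega)]
        rw [List.getElem_set_self (by simp; omega)]
        rw [List.drop_set, if_pos (by omega)]
      rw [hdrop]
      have hrep : m + 1 - j = (m - j) + 1 := by omega
      rw [hrep, List.replicate_succ']
      simp

-- ['1'] is a prefix of l.drop k iff l[k] = '1'
lemma prefix_one (l : List Char) (k : Nat) :
    (['1'].isPrefixOf (l.drop k)) = true ↔ l[k]? = some '1' := by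
  have h : l[k]? = (l.drop k).head? := by
    rw [List.head?_eq_getElem?, List.getElem?_drop, Nat.add_zero]
  rw [h]
  cases l.drop k with
  | nil => simp [List.isPrefixOf]
  | cons a t =>
    simp [List.isPrefixOf]
    exact eq_comm


-- rfind.go returns the greatest '1'-position ≤ jcur
lemma rfind_go_eq (l : List Char) (j : Nat) (hP : l[j]? = some '1') :
    ∀ jcur : Nat, j ≤ jcur → (∀ k, j < k → k ≤ jcur → l[k]? ≠ some '1') →
    PySem.Chars.rfind.go l ['1'] jcur = (j : Int) := by
  intro jcur
  induction jcur with
  | zero =>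
    intro hle _
    interval_cases j
    simp only [PySem.Chars.rfind.go]
    rw [if_pos (by have := (prefix_one l 0).mpr hP; simpa using this)]
    rfl
  | succ jc ih =>
    intro hle hgr
    simp only [PySem.Chars.rfind.go]
    by_cases hj : j = jc + 1
    · subst hj
      rw [if_pos ((prefix_one l (jc+1)).mpr hP)]
    · have hne : ¬ (['1'].isPrefixOf (l.drop (jc+1)) = true) := by
        intro h
        exact hgr (jc+1) (by omega) (le_refl _) ((prefix_one l (jc+1)).mp h)
      rw [if_neg hne]
      exact ih (by omega) (fun k h1 h2 => hgr k h1 (by omega))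

theorem add1_agree (string : String) (hpre : Pre_add1 string) :
    add1 string = add1_alt string := by
  have hpre' : PySem.Chars.isIn ['1'] string.toList = true := hpre
  have hmem : '1' ∈ string.toList := by
    have h : (['1'] : List Char) <:+: string.toList :=
      (PySem.Chars.isIn_iff_infix ['1'] string.toList).mp hpre'
    exact List.singleton_sublist.mp h.sublist
  have hn : 0 < string.toList.length := List.length_pos_of_mem hmem
  obtain ⟨i0, hi0lt, hi0⟩ := List.getElem_of_mem hmem
  have hPi0 : string.toList[i0]? = some '1' := by
    rw [List.getElem?_eq_getElem hi0lt, hi0]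
  -- the greatest index of '1'
  have hPj : string.toList[Nat.findGreatest (fun k => string.toList[k]? = some '1')
      (string.toList.length - 1)]? = some '1' :=
    Nat.findGreatest_spec (P := fun k => string.toList[k]? = some '1') (n := string.toList.length - 1) (m := i0) (by omega) hPi0
  generalize hj : Nat.findGreatest (fun k => string.toList[k]? = some '1')
      (string.toList.length - 1) = j at hPj
  have hjle : j ≤ string.toList.length - 1 := by
    rw [← hj]; exact Nat.findGreatest_le _
  have hgr : ∀ k, j < k → k ≤ string.toList.length - 1 →
      ¬ (string.toList[k]? = some '1') := by
    intro k h1 h2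
    rw [← hj] at h1
    exact Nat.findGreatest_is_greatest (P := fun k => string.toList[k]? = some '1') h1 h2
  -- rfind computes j
  have hrfind : PySem.Str.rfind string "1" = (j : Int) := by
    rw [PySem.Str.rfind_eq]
    show PySem.Chars.rfind string.toList ['1'] = (j : Int)
    unfold PySem.Chars.rfind
    exact rfind_go_eq string.toList j hPj string.toList.length (by omega)
      (fun k h1 h2 => by
        rcases Nat.lt_or_ge k string.toList.length with hk | hk
        · exact hgr k h1 (by omega)
        · rw [List.getElem?_eq_none hk]; simp)
  -- the last character
  have hneg1 : (-1 : Int) = ((string.toList.length - 1 : Nat) : Int) - (string.toList.length : Int) := by omega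
  have hlast : PySem.List.pyGet? string.toList (-1) = string.toList[string.toList.length - 1]? := by
    rw [hneg1, pyGet_negIdx string.toList (string.toList.length - 1) (by omega)]
  have hsome : string.toList[string.toList.length - 1]? = some string.toList[string.toList.length - 1] :=
    List.getElem?_eq_getElem (by omega)
  unfold add1 add1_alt
  have hni : ¬ (PySem.Str.isIn "1" string = false) := by
    simp only [Bool.not_eq_false]; exact hpre
  rw [if_neg hni, if_neg hni]
  simp only [hlast, hsome]
  by_cases hc1 : string.toList[string.toList.length - 1] = '1'
  · -- last char is '1': j = length-1
    have hjeq : j = string.toList.length - 1 := by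
      have hge : string.toList.length - 1 ≤ Nat.findGreatest
          (fun k => string.toList[k]? = some '1') (string.toList.length - 1) :=
        Nat.le_findGreatest (P := fun k => string.toList[k]? = some '1') (le_refl _)
          (by show string.toList[string.toList.length - 1]? = some '1'; rw [hsome, hc1])
      omega
    rw [hc1]
    rw [if_pos rfl, if_neg (show ¬¬(('1':Char) = '1' ∨ ('1':Char) = '2') by simp)]
    rw [hrfind, hjeq]
    rw [hneg1, pySetD_negIdx string.toList (string.toList.length - 1) '2' (by omega)]
    rw [PySem.List.slice_to_natCast]
    congr 2
    rw [List.set_eq_take_append_cons_drop, if_pos (by omega)]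
    have h0 : ((string.toList.length : Int) - ((string.toList.length - 1 : Nat) : Int) - 1).toNat = 0 := by omega
    have hd : string.toList.drop (string.toList.length - 1 + 1) = [] :=
      List.drop_eq_nil_of_le (by omega)
    rw [h0, hd]
    simp
  · by_cases hc2 : string.toList[string.toList.length - 1] = '2'
    · -- last char is '2': the carry loop
      rw [hc2]
      rw [if_neg (show ¬ (some ('2':Char) = some '1') by simp), if_pos rfl,
          if_neg (show ¬¬(('2':Char) = '1' ∨ ('2':Char) = '2') by simp)]
      rw [hneg1]
      rw [add1Loop_eq (string.toList.length - 1) string.toList (string.toList.length + 1) j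
        (by omega) (by omega) hjle hPj (fun k h1 h2 => hgr k h1 h2)]
      rw [hrfind, PySem.List.slice_to_natCast]
      simp only [Option.map_some]
      congr 2
      have hd : string.toList.drop (string.toList.length - 1 + 1) = [] :=
        List.drop_eq_nil_of_le (by omega)
      rw [hd]
      have ht : ((string.toList.length : Int) - (j : Int) - 1).toNat = string.toList.length - 1 - j := by omega
      rw [ht]
      simp
    · rw [if_neg (fun h => hc1 (Option.some.inj h)),
          if_neg (fun h => hc2 (Option.some.inj h)),
          if_pos (show ¬(string.toList[string.toList.length - 1] = '1' ∨
            string.toList[string.toList.length - 1] = '2') by rintro (h|h); exacts [hc1 h, hc2 h])]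

-- ===== VERDICT (by name: the statement is the Claim_ definition above) =====
theorem add1_spec : Claim_equal_add1 := by
  intro string _ hpre
  unfold Spec_add1
  exact add1_agree string hpre
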